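-- pv_equiv track=rewrite | github.com/ekinrf/ProgPuzzles | StudentAttendanceRec/python/stu_att_rec.py | num_rewardable
-- ===== SOURCE A (Python) =====
-- def num_rewardable(n):
--     mod_fac = 1000000007
--     if n is 0:
--         return 0
--     if n is 1:
--         return 3
--
--     non_a = [1, 2, 4]
--     i = 3
--     while i <= n:
--         non_a.append((non_a[i - 1] + non_a[i - 2] + non_a[i - 3]) % mod_fac)
--         i += 1
--     result = non_a[n]
--     for i in range(n):
--         result += non_a[i] * non_a[n - i - 1] % mod_fac
--         result %= mod_fac
--     return result
-- ===== SOURCE B (Python) =====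
-- def num_rewardable(n):
--     MOD = 1000000007
--     if n <= 0:
--         return 0
--     if n == 1:
--         return 3
--     # u(k): records of length k over {P,L} with no 3 consecutive L  (u0,u1,u2 = 1,2,4)
--     # v(k): records of length k with exactly one A and no 3 consecutive L
--     # v(k) = v(k-1)+v(k-2)+v(k-3)+u(k)   (the A ends a block); answer = u(n)+v(n)
--     u0, u1, u2 = 1, 2, 4
--     v0, v1, v2 = 0, 1, 4
--     for _ in range(n - 2):
--         u3 = (u0 + u1 + u2) % MOD
--         v3 = (v0 + v1 + v2 + u3) % MOD
--         u0, u1, u2 = u1, u2, u3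
--         v0, v1, v2 = v1, v2, v3
--     return (u2 + v2) % MOD
-- ===== Notes on version B (the rewrite author's own statement) =====
-- stated objective: faster
-- what changed: Replaces A's materialised tribonacci list plus a second O(n) convolution pass by one 6-variable loop using the recurrence v(n)=v(n-1)+v(n-2)+v(n-3)+u(n) for the one-absence count, so no list and no second pass.
-- intended difference: For n in {-1,-2,-3} A negative-indexes its seed list [1,2,4] and returns the leftover wraparound values 4/2/1; B returns 0, the intended count of rewardable records of negative length. — e.g. on num_rewardable(-1): A returns 4, B returns 0
import Mathlib
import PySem

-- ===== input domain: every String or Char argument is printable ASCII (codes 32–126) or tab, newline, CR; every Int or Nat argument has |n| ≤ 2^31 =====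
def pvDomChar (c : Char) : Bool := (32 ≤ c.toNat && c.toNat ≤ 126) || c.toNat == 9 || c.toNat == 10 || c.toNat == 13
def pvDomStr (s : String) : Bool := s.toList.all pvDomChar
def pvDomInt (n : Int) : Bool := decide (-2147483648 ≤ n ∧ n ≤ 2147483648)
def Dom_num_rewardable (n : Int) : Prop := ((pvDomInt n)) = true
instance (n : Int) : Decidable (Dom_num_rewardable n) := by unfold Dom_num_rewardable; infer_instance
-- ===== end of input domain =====

-- B replaces A's tribonacci list + second convolution pass by one 6-variable loop
-- (recurrence v(n)=v(n-1)+v(n-2)+v(n-3)+u(n)): same values, single pass, O(1) space.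

-- ===== PORT A =====
-- the 'while i <= n' loop appending to non_a; fuel (n-2).toNat bounds the iteration count
def pvAWhile (n : Int) : Nat → List Int → Int → List Int
  | 0, xs, _ => xs
  | f + 1, xs, i =>
    if i ≤ n then
      pvAWhile n f
        (xs ++ [PySem.Int.mod
          (PySem.List.pyGetD xs (i - 1) 0 + PySem.List.pyGetD xs (i - 2) 0 +
            PySem.List.pyGetD xs (i - 3) 0) 1000000007])
        (i + 1)
    else xs

def num_rewardable (n : Int) : Int :=
  if n = 0 then 0
  else if n = 1 then 3
  else
    let non_a := pvAWhile n (n - 2).toNat [1, 2, 4] 3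
    -- non_a[n]: the default 0 is only reached where Python raises IndexError (n ≤ -4), excluded by Pre_
    let result := PySem.List.pyGetD non_a n 0
    (PySem.List.pyRange 0 n 1).foldl
      (fun r i =>
        PySem.Int.mod
          (r + PySem.Int.mod
                (PySem.List.pyGetD non_a i 0 * PySem.List.pyGetD non_a (n - i - 1) 0)
                1000000007)
          1000000007)
      result

-- ===== PORT B =====
-- the 'for _ in range(n-2)' loop over the six scalars (u0,u1,u2),(v0,v1,v2)
def pvBLoop : Nat → Int × Int × Int → Int × Int × Int → (Int × Int × Int) × (Int × Int × Int)
  | 0, u, v => (u, v)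
  | k + 1, (u0, u1, u2), (v0, v1, v2) =>
    let u3 := PySem.Int.mod (u0 + u1 + u2) 1000000007
    let v3 := PySem.Int.mod (v0 + v1 + v2 + u3) 1000000007
    pvBLoop k (u1, u2, u3) (v1, v2, v3)

def num_rewardable_alt (n : Int) : Int :=
  if n ≤ 0 then 0
  else if n = 1 then 3
  else
    let s := pvBLoop (n - 2).toNat (1, 2, 4) (0, 1, 4)
    PySem.Int.mod (s.1.2.2 + s.2.2.2) 1000000007

-- ===== PRECONDITION & SPEC =====
-- Pre_ excludes only n ≤ -4, where A raises IndexError (non_a[n] out of range).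
def Pre_num_rewardable (n : Int) : Prop := -3 ≤ n
instance (n : Int) : Decidable (Pre_num_rewardable n) := by unfold Pre_num_rewardable; infer_instance
def pvWitness_num_rewardable : Int := 5

-- For n in {-1,-2,-3} A negative-indexes its seed list [1,2,4] and returns the leftover
-- wraparound values 4/2/1; B returns 0, the intended count for a negative-length record.
def D_num_rewardable (n : Int) : Prop := -3 ≤ n ∧ n < 0
instance (n : Int) : Decidable (D_num_rewardable n) := by unfold D_num_rewardable; infer_instance

def Spec_num_rewardable (n : Int) (out : Int) : Prop := ¬ D_num_rewardable n → out = num_rewardable_alt n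
instance (n : Int) (out : Int) : Decidable (Spec_num_rewardable n out) := by unfold Spec_num_rewardable; infer_instance

def pvDiffWitness_num_rewardable : Int := -1
def pvDiffWitnessOut_num_rewardable : Int × Int := (4, 0)

-- ===== CLAIM (what is proved, stated in full; the proofs are below) =====
def Claim_unchanged_num_rewardable : Prop := ∀ (n : Int), Dom_num_rewardable n → Pre_num_rewardable n → Spec_num_rewardable n (num_rewardable n)
def Claim_changed_num_rewardable : Prop := Dom_num_rewardable (pvDiffWitness_num_rewardable) ∧ Pre_num_rewardable (pvDiffWitness_num_rewardable) ∧ D_num_rewardable (pvDiffWitness_num_rewardable) ∧ num_rewardable (pvDiffWitness_num_rewardable) = pvDiffWitnessOut_num_rewardable.1 ∧ num_rewardable_alt (pvDiffWitness_num_rewardable) = pvDiffWitnessOut_num_rewardable.2 ∧ pvDiffWitnessOut_num_rewardable.1 ≠ pvDiffWitnessOut_num_rewardable.2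
def Claim_exact_num_rewardable : Prop := ∀ (n : Int), Dom_num_rewardable n → Pre_num_rewardable n → D_num_rewardable n → num_rewardable n ≠ num_rewardable_alt n

-- ===== LEMMAS AND PROOFS =====

-- reference sequences: pvT k = A's non_a[k] (tribonacci mod p), pvV k = one-absence count mod p
def pvT : Nat → Int
  | 0 => 1 | 1 => 2 | 2 => 4
  | k + 3 => PySem.Int.mod (pvT (k + 2) + pvT (k + 1) + pvT k) 1000000007
def pvV : Nat → Int
  | 0 => 0 | 1 => 1 | 2 => 4
  | k + 3 => PySem.Int.mod (pvV (k + 2) + pvV (k + 1) + pvV k + pvT (k + 3)) 1000000007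

def pvwT (k : Nat) : ZMod 1000000007 := ((pvT k : Int) : ZMod 1000000007)
def pvwV (k : Nat) : ZMod 1000000007 := ((pvV k : Int) : ZMod 1000000007)
def pvS (m : Nat) : ZMod 1000000007 := ∑ i ∈ Finset.range m, pvwT i * pvwT (m - 1 - i)

lemma pvT_bounds (k : Nat) : 0 ≤ pvT k ∧ pvT k < 1000000007 := by
  match k with
  | 0 | 1 | 2 => norm_num [pvT]
  | k + 3 =>
    exact ⟨PySem.Int.mod_nonneg _ (by norm_num),
           PySem.Int.mod_lt _ (by norm_num)⟩

lemma pvCastMod (a : Int) :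
    ((PySem.Int.mod a 1000000007 : Int) : ZMod 1000000007) = (a : ZMod 1000000007) := by
  rw [PySem.Int.mod_eq_emod_of_pos (by norm_num : (0:Int) < 1000000007)]
  exact_mod_cast ZMod.intCast_mod a 1000000007

lemma pvwT_rec (k : Nat) : pvwT (k + 3) = pvwT (k + 2) + pvwT (k + 1) + pvwT k := by
  rw [pvwT, pvT, pvCastMod]; unfold pvwT; push_cast; ring

lemma pvwV_rec (k : Nat) :
    pvwV (k + 3) = pvwV (k + 2) + pvwV (k + 1) + pvwV k + pvwT (k + 3) := by
  rw [pvwV, pvV, pvCastMod]; unfold pvwV pvwT; push_cast; ring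

lemma pvS_succ3 (m : Nat) : pvS (m + 3) = pvS (m + 2) + pvS (m + 1) + pvS m + pvwT (m + 3) := by
  have e3 : pvS (m + 3) =
      (∑ i ∈ Finset.range m, pvwT i * pvwT (m + 2 - i)) +
        pvwT m * pvwT 2 + pvwT (m + 1) * pvwT 1 + pvwT (m + 2) * pvwT 0 := by
    unfold pvS
    rw [Finset.sum_range_succ, Finset.sum_range_succ, Finset.sum_range_succ]
    have h0 : m + 3 - 1 - m = 2 := by omega
    have h1 : m + 3 - 1 - (m + 1) = 1 := by omega
    have h2 : m + 3 - 1 - (m + 2) = 0 := by omega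
    rw [h0, h1, h2]
    congr 3
  have e2 : pvS (m + 2) =
      (∑ i ∈ Finset.range m, pvwT i * pvwT (m + 1 - i)) + pvwT m * pvwT 1 + pvwT (m + 1) * pvwT 0 := by
    unfold pvS
    rw [Finset.sum_range_succ, Finset.sum_range_succ]
    have h0 : m + 2 - 1 - m = 1 := by omega
    have h1 : m + 2 - 1 - (m + 1) = 0 := by omega
    rw [h0, h1]
    congr 2
  have e1 : pvS (m + 1) =
      (∑ i ∈ Finset.range m, pvwT i * pvwT (m - i)) + pvwT m * pvwT 0 := by
    unfold pvS
    rw [Finset.sum_range_succ]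
    have h0 : m + 1 - 1 - m = 0 := by omega
    rw [h0]
    congr 1
  have hinner : ∀ i ∈ Finset.range m,
      pvwT i * pvwT (m + 2 - i) =
        pvwT i * pvwT (m + 1 - i) + pvwT i * pvwT (m - i) + pvwT i * pvwT (m - 1 - i) := by
    intro i hi
    have hi' : i < m := Finset.mem_range.mp hi
    have ha : m + 2 - i = (m - 1 - i) + 3 := by omega
    have hb : (m - 1 - i) + 2 = m + 1 - i := by omega
    have hc : (m - 1 - i) + 1 = m - i := by omega
    rw [ha, pvwT_rec, hb, hc, mul_add, mul_add]
  have hsplit : (∑ i ∈ Finset.range m, pvwT i * pvwT (m + 2 - i)) =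
      (∑ i ∈ Finset.range m, pvwT i * pvwT (m + 1 - i)) +
      (∑ i ∈ Finset.range m, pvwT i * pvwT (m - i)) +
      (∑ i ∈ Finset.range m, pvwT i * pvwT (m - 1 - i)) := by
    rw [Finset.sum_congr rfl hinner, Finset.sum_add_distrib, Finset.sum_add_distrib]
  have hT0 : pvwT 0 = 1 := by norm_num [pvwT, pvT]
  have hT1 : pvwT 1 = 2 := by norm_num [pvwT, pvT]
  have hT2 : pvwT 2 = 4 := by norm_num [pvwT, pvT]
  have hrec := pvwT_rec m
  rw [e3, e2, e1, hsplit, hT0, hT1, hT2, hrec]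
  show _ = _ + _ + pvS m + _
  unfold pvS
  ring

lemma pvS_eq_pvwV : ∀ (m : Nat), pvS m = pvwV m := by
  intro m
  induction m using Nat.strong_induction_on with
  | _ m ih =>
    match m with
    | 0 => norm_num [pvS, pvwV, pvV]
    | 1 =>
      have : pvS 1 = pvwT 0 * pvwT 0 := by simp [pvS]
      rw [this]; norm_num [pvwT, pvT, pvwV, pvV]
    | 2 =>
      have : pvS 2 = pvwT 0 * pvwT (2 - 1 - 0) + pvwT 1 * pvwT (2 - 1 - 1) := by
        simp [pvS, Finset.sum_range_succ]
      rw [this]; norm_num [pvwT, pvT, pvwV, pvV]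
    | k + 3 =>
      rw [pvS_succ3, pvwV_rec, ih (k+2) (by omega), ih (k+1) (by omega), ih k (by omega)]

lemma pvBLoop_spec (k : Nat) : ∀ (j : Nat),
    pvBLoop k (pvT j, pvT (j + 1), pvT (j + 2)) (pvV j, pvV (j + 1), pvV (j + 2)) =
      ((pvT (j + k), pvT (j + k + 1), pvT (j + k + 2)),
       (pvV (j + k), pvV (j + k + 1), pvV (j + k + 2))) := by
  induction k with
  | zero => intro j; rfl
  | succ k ih =>
    intro j
    have hu : PySem.Int.mod (pvT j + pvT (j + 1) + pvT (j + 2)) 1000000007 = pvT (j + 3) := by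
      rw [pvT]; ring_nf
    have hv : PySem.Int.mod (pvV j + pvV (j + 1) + pvV (j + 2) + pvT (j + 3)) 1000000007 = pvV (j + 3) := by
      rw [pvV]; ring_nf
    show pvBLoop k (pvT (j+1), pvT (j+2), _) (pvV (j+1), pvV (j+2), _) = _
    rw [hu, hv]
    have := ih (j + 1)
    rw [this]
    have e1 : j + 1 + k = j + (k+1) := by omega
    rw [e1]

lemma pvGetT (m k : Nat) (hk : k < m) :
    PySem.List.pyGetD ((List.range m).map pvT) ((k : Nat) : Int) 0 = pvT k := by
  rw [PySem.List.pyGetD_natCast, PySem.List.getD_map_range pvT m k 0 hk]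

lemma pvAWhile_spec (n : Int) : ∀ (f m : Nat), 3 ≤ m → ((m : Int) + (f : Int) = n + 1) →
    pvAWhile n f ((List.range m).map pvT) (m : Int) = (List.range (m + f)).map pvT := by
  intro f
  induction f with
  | zero => intro m _ _; rfl
  | succ f ih =>
    intro m hm hsum
    rw [pvAWhile]
    have hle : (m : Int) ≤ n := by push_cast at hsum ⊢; omega
    rw [if_pos hle]
    have g1 : (m : Int) - 1 = ((m - 1 : Nat) : Int) := by omega
    have g2 : (m : Int) - 2 = ((m - 2 : Nat) : Int) := by omega
    have g3 : (m : Int) - 3 = ((m - 3 : Nat) : Int) := by omega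
    rw [g1, g2, g3, pvGetT m (m-1) (by omega), pvGetT m (m-2) (by omega), pvGetT m (m-3) (by omega)]
    have hT : PySem.Int.mod (pvT (m - 1) + pvT (m - 2) + pvT (m - 3)) 1000000007 = pvT m := by
      obtain ⟨m', rfl⟩ : ∃ m', m = m' + 3 := ⟨m - 3, by omega⟩
      have e1 : m' + 3 - 1 = m' + 2 := by omega
      have e2 : m' + 3 - 2 = m' + 1 := by omega
      have e3 : m' + 3 - 3 = m' := by omega
      rw [e1, e2, e3, pvT]
    rw [hT]
    have hlist : (List.range m).map pvT ++ [pvT m] = (List.range (m + 1)).map pvT := by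
      rw [List.range_succ, List.map_append]; rfl
    rw [hlist]
    have hcast : (m : Int) + 1 = ((m + 1 : Nat) : Int) := by push_cast; ring
    have hend : m + 1 + f = m + (f + 1) := by omega
    rw [hcast, ih (m + 1) (by omega) (by push_cast at hsum ⊢; omega), hend]

lemma pvIntEq (a b : Int) (ha0 : 0 ≤ a) (ha1 : a < 1000000007) (hb0 : 0 ≤ b)
    (hb1 : b < 1000000007) (h : (a : ZMod 1000000007) = (b : ZMod 1000000007)) : a = b := by
  have hmod := (ZMod.intCast_eq_intCast_iff a b 1000000007).mp h
  have hp : ((1000000007 : Nat) : Int) = 1000000007 := by norm_num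
  have : a % 1000000007 = b % 1000000007 := by
    have := hmod
    unfold Int.ModEq at this
    rwa [hp] at this
  rwa [Int.emod_eq_of_lt ha0 ha1, Int.emod_eq_of_lt hb0 hb1] at this

lemma pvFoldStep {α : Type} (g : α → Int → α) (r : α) (m : Nat) :
    ((List.range (m + 1)).map (fun k : Nat => (k : Int))).foldl g r =
      g (((List.range m).map (fun k : Nat => (k : Int))).foldl g r) (m : Int) := by
  rw [List.range_succ, List.map_append, List.foldl_append]; rfl

lemma pvFold (n : Int) (h2 : 2 ≤ n) : ∀ (m : Nat), m ≤ n.toNat → ∀ (r : Int), 0 ≤ r → r < 1000000007 →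
    (((((List.range m).map (fun k : Nat => (k : Int))).foldl
        (fun r i =>
          PySem.Int.mod
            (r + PySem.Int.mod
                  (PySem.List.pyGetD ((List.range (n.toNat + 1)).map pvT) i 0 *
                    PySem.List.pyGetD ((List.range (n.toNat + 1)).map pvT) (n - i - 1) 0)
                  1000000007)
            1000000007)
        r : Int) : ZMod 1000000007)
        = (r : ZMod 1000000007) + ∑ i ∈ Finset.range m, pvwT i * pvwT (n.toNat - 1 - i)) ∧
      (0 ≤ (((List.range m).map (fun k : Nat => (k : Int))).foldl
        (fun r i =>
          PySem.Int.mod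
            (r + PySem.Int.mod
                  (PySem.List.pyGetD ((List.range (n.toNat + 1)).map pvT) i 0 *
                    PySem.List.pyGetD ((List.range (n.toNat + 1)).map pvT) (n - i - 1) 0)
                  1000000007)
            1000000007)
        r) ∧ (((List.range m).map (fun k : Nat => (k : Int))).foldl
        (fun r i =>
          PySem.Int.mod
            (r + PySem.Int.mod
                  (PySem.List.pyGetD ((List.range (n.toNat + 1)).map pvT) i 0 *
                    PySem.List.pyGetD ((List.range (n.toNat + 1)).map pvT) (n - i - 1) 0)
                  1000000007)
            1000000007)
        r) < 1000000007) := by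
  intro m
  induction m with
  | zero => intro _ r hr0 hr1; exact ⟨by simp, hr0, hr1⟩
  | succ m ih =>
    intro hm r hr0 hr1
    obtain ⟨ihc, ihb0, ihb1⟩ := ih (by omega) r hr0 hr1
    rw [pvFoldStep]
    refine ⟨?_, PySem.Int.mod_nonneg _ (by norm_num), PySem.Int.mod_lt _ (by norm_num)⟩
    rw [pvGetT (n.toNat + 1) m (by omega)]
    have hidx : n - (m : Int) - 1 = ((n.toNat - 1 - m : Nat) : Int) := by omega
    rw [hidx, pvGetT (n.toNat + 1) (n.toNat - 1 - m) (by omega)]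
    rw [pvCastMod]
    push_cast
    rw [pvCastMod]
    push_cast
    rw [ihc, Finset.sum_range_succ]
    unfold pvwT
    ring

lemma pv_main (n : Int) (h2 : 2 ≤ n) : num_rewardable n = num_rewardable_alt n := by
  have hN : n = ((n.toNat : Nat) : Int) := by omega
  have hN2 : 2 ≤ n.toNat := by omega
  -- A side
  have hseed : ([1, 2, 4] : List Int) = (List.range 3).map pvT := by decide
  have hwhile : pvAWhile n (n - 2).toNat [1, 2, 4] 3 = (List.range (n.toNat + 1)).map pvT := by
    rw [hseed]
    have h3 : ((3 : Nat) : Int) = (3 : Int) := by norm_num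
    rw [← h3, pvAWhile_spec n (n - 2).toNat 3 (by omega) (by omega)]
    have : 3 + (n - 2).toNat = n.toNat + 1 := by omega
    rw [this]
  have hrange : PySem.List.pyRange 0 n 1 = (List.range n.toNat).map (fun k : Nat => (k : Int)) := by
    have := PySem.List.pyRange_zero_natCast n.toNat
    rw [← hN] at this
    exact this
  have hres : PySem.List.pyGetD ((List.range (n.toNat + 1)).map pvT) n 0 = pvT n.toNat := by
    have := pvGetT (n.toNat + 1) n.toNat (by omega)
    rw [← hN] at this
    exact this
  have hA : num_rewardable n =
      ((List.range n.toNat).map (fun k : Nat => (k : Int))).foldl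
        (fun r i =>
          PySem.Int.mod
            (r + PySem.Int.mod
                  (PySem.List.pyGetD ((List.range (n.toNat + 1)).map pvT) i 0 *
                    PySem.List.pyGetD ((List.range (n.toNat + 1)).map pvT) (n - i - 1) 0)
                  1000000007)
            1000000007)
        (pvT n.toNat) := by
    rw [num_rewardable, if_neg (by omega), if_neg (by omega)]
    simp only [hwhile, hrange, hres]
  obtain ⟨hTb0, hTb1⟩ := pvT_bounds n.toNat
  obtain ⟨hAc, hAb0, hAb1⟩ := pvFold n h2 n.toNat (le_refl _) (pvT n.toNat) hTb0 hTb1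
  -- B side
  have hB : num_rewardable_alt n = PySem.Int.mod (pvT n.toNat + pvV n.toNat) 1000000007 := by
    rw [num_rewardable_alt, if_neg (by omega), if_neg (by omega)]
    have hseedB : ((1, 2, 4) : Int × Int × Int) = (pvT 0, pvT 1, pvT 2) := by decide
    have hseedV : ((0, 1, 4) : Int × Int × Int) = (pvV 0, pvV 1, pvV 2) := by decide
    show PySem.Int.mod ((pvBLoop (n - 2).toNat (1, 2, 4) (0, 1, 4)).1.2.2 +
          (pvBLoop (n - 2).toNat (1, 2, 4) (0, 1, 4)).2.2.2) 1000000007 = _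
    rw [hseedB, hseedV]
    have h0 : pvT 0 = pvT 0 := rfl
    have := pvBLoop_spec (n - 2).toNat 0
    simp only [Nat.zero_add] at this
    rw [this]
    have e : (n - 2).toNat + 2 = n.toNat := by omega
    rw [e]
  -- combine over ZMod
  apply pvIntEq _ _ (hA ▸ hAb0) (hA ▸ hAb1)
    (hB ▸ PySem.Int.mod_nonneg _ (by norm_num)) (hB ▸ PySem.Int.mod_lt _ (by norm_num))
  rw [hA, hB, hAc, pvCastMod]
  have hsum : (∑ i ∈ Finset.range n.toNat, pvwT i * pvwT (n.toNat - 1 - i)) = pvS n.toNat := rfl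
  rw [hsum, pvS_eq_pvwV]
  unfold pvwV
  push_cast
  ring

-- ===== VERDICT (by name: the statement is the Claim_ definition above) =====
theorem num_rewardable_spec : Claim_unchanged_num_rewardable := by
  intro n _ hpre hnd
  unfold Pre_num_rewardable at hpre
  unfold D_num_rewardable at hnd
  have h0 : 0 ≤ n := by omega
  by_cases h : n < 2
  · interval_cases n <;> decide
  · exact pv_main n (by omega)

theorem num_rewardable_changed : Claim_changed_num_rewardable := by
  unfold Claim_changed_num_rewardable; decide

theorem num_rewardable_tight : Claim_exact_num_rewardable := by
  intro n _ _ hd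
  unfold D_num_rewardable at hd
  obtain ⟨h1, h2⟩ := hd
  interval_cases n <;> decide
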